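-- pv_equiv track=rewrite | github.com/IShkuropiy/python-exercises | asterisk/maskDigits.py | maskDigits
-- ===== SOURCE A (Python) =====
-- def maskDigits(s):
--     digits = "0123456789"
--     strBuild = [] # string builder, pattern in work with a strs
--     for char in s:
--         if char in digits:
--             strBuild.append("#")
--         else:
--             strBuild.append(char)
--
--     return  "".join(strBuild)
-- ===== SOURCE B (Python) =====
-- def maskDigits(s):
--     for d in "0123456789":
--         s = s.replace(d, "#")
--     return s
-- ===== Notes on version B (the rewrite author's own statement) =====
-- stated objective: alternative
-- what changed: Replaces A's single pass with a per-character membership test and list string-builder by ten staged whole-string str.replace passes, one per digit; correct because the mask character is not a digit so later passes never disturb earlier substitutions.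
import Mathlib
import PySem

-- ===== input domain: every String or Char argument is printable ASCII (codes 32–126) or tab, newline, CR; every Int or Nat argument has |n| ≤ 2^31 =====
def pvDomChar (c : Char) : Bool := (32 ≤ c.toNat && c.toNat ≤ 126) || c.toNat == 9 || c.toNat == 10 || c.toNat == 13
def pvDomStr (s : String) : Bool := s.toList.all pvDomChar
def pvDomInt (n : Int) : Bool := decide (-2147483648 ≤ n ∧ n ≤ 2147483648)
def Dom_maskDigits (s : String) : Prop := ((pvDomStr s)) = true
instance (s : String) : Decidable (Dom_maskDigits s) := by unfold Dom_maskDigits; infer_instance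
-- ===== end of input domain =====

-- B replaces A's single pass with per-character branch and list builder by ten staged
-- whole-string replace passes (one per digit); equivalence of return values is proved below.

-- ===== PORT A =====
-- for char in s: append "#" if char in digits else char; then "".join(strBuild)
def maskDigits (s : String) : String :=
  let digits : String := "0123456789"
  let strBuild : List String :=
    s.toList.foldl
      (fun acc char =>
        if digits.toList.contains char then acc ++ ["#"] else acc ++ [char.toString])
      []
  PySem.Str.join "" strBuild

-- ===== PORT B =====
-- for d in "0123456789": s = s.replace(d, "#"); return s
def maskDigits_alt (s : String) : String :=
  "0123456789".toList.foldl (fun t d => PySem.Str.replace t d.toString "#") s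

-- ===== PRECONDITION & SPEC =====
def Spec_maskDigits (s : String) (out : String) : Prop := out = maskDigits_alt s
instance (s : String) (out : String) : Decidable (Spec_maskDigits s out) := by unfold Spec_maskDigits; infer_instance

-- ===== CLAIM (what is proved, stated in full; the proofs are below) =====
def Claim_equal_maskDigits : Prop := ∀ (s : String), Dom_maskDigits s → Spec_maskDigits s (maskDigits s)

-- ===== LEMMAS AND PROOFS =====

-- replace with a single-character pattern is a character map
theorem go_singleton (d : Char) (l : List Char) :
    ∀ (fuel : Nat) (acc : List Char), l.length ≤ fuel →
      PySem.Chars.replace.go [d] ['#'] fuel l acc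
        = acc.reverse ++ l.map (fun c => if c = d then '#' else c) := by
  induction l with
  | nil =>
    intro fuel acc _
    cases fuel <;> simp [PySem.Chars.replace.go]
  | cons c t ih =>
    intro fuel acc hle
    cases fuel with
    | zero => simp at hle
    | succ n =>
      rw [PySem.Chars.replace.go]
      by_cases h : c = d
      · subst h
        rw [if_pos (by simp [List.isPrefixOf])]
        simp only [List.length_cons] at hle
        simp only [List.length_cons, List.length_nil, List.drop_succ_cons, List.drop_zero]
        rw [ih n _ (by omega)]
        simp
      · rw [if_neg (by simp [List.isPrefixOf]; exact fun he => h he.symm)]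
        simp only [List.length_cons] at hle
        rw [ih n _ (by omega)]
        simp [h]

theorem replace_singleton (cs : List Char) (d : Char) :
    PySem.Chars.replace cs [d] ['#'] = cs.map (fun c => if c = d then '#' else c) := by
  rw [PySem.Chars.replace]
  rw [if_neg (by simp)]
  rw [go_singleton d cs cs.length [] le_rfl]
  simp

-- per-char effect of the ten staged substitutions: first matching digit maps to '#'
theorem point_digits (c : Char) :
    (("0123456789".toList).foldl (fun x d => if x = d then '#' else x) c)
      = if ("0123456789".toList).contains c then '#' else c := by
  have hd : "0123456789".toList = ['0','1','2','3','4','5','6','7','8','9'] := by decide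
  rw [hd]
  by_cases h : c ∈ ['0','1','2','3','4','5','6','7','8','9']
  · rw [if_pos (by simpa using h)]
    simp only [List.mem_cons, List.not_mem_nil, or_false] at h
    rcases h with rfl|rfl|rfl|rfl|rfl|rfl|rfl|rfl|rfl|rfl <;> decide
  · rw [if_neg (by simpa using h)]
    simp only [List.mem_cons, List.not_mem_nil, or_false, not_or] at h
    obtain ⟨h0,h1,h2,h3,h4,h5,h6,h7,h8,h9⟩ := h
    simp [List.foldl_cons, h0,h1,h2,h3,h4,h5,h6,h7,h8,h9]

-- a fold of whole-list maps is one map of the per-char fold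
theorem fold_map_chars (ds : List Char) (cs : List Char) :
    ds.foldl (fun t d => t.map (fun c => if c = d then '#' else c)) cs
      = cs.map (fun c => ds.foldl (fun x d => if x = d then '#' else x) c) := by
  induction ds generalizing cs with
  | nil => simp
  | cons d ds ih =>
    simp only [List.foldl_cons]
    rw [ih, List.map_map]
    rfl

theorem join_empty_flatten (parts : List String) :
    (PySem.Str.join "" parts).toList = (parts.map String.toList).flatten := by
  rw [PySem.Str.toList_join]
  induction parts with
  | nil => rfl
  | cons p ps ih =>
    cases ps with
    | nil => simp [PySem.Chars.join, List.intercalate]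
    | cons q qs =>
      simp only [List.map_cons] at ih ⊢
      rw [PySem.Chars.join_cons_cons]
      simp only [List.flatten_cons] at ih ⊢
      rw [ih]
      simp

theorem mask_foldl (cs : List Char) (acc : List String) :
    ((cs.foldl
        (fun acc char =>
          if ("0123456789".toList).contains char then acc ++ ["#"] else acc ++ [char.toString])
        acc).map String.toList).flatten
      = (acc.map String.toList).flatten
        ++ cs.map (fun c => if ("0123456789".toList).contains c then '#' else c) := by
  induction cs generalizing acc with
  | nil => simp
  | cons c cs ih =>
    simp only [List.foldl_cons, List.map_cons]
    by_cases h : ("0123456789".toList).contains c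
    · rw [if_pos h, ih]
      simp only [if_pos h, List.map_append]
      simp
    · rw [if_neg h, ih]
      simp only [if_neg h, List.map_append]
      simp [Char.toString]

theorem alt_chars (ds : List Char) (s : String) :
    (ds.foldl (fun t d => PySem.Str.replace t d.toString "#") s).toList
      = ds.foldl (fun t d => t.map (fun c => if c = d then '#' else c)) s.toList := by
  induction ds generalizing s with
  | nil => rfl
  | cons d ds ih =>
    simp only [List.foldl_cons]
    rw [ih]
    have hc : (d.toString).toList = [d] := by simp [Char.toString]
    have hh : ("#" : String).toList = ['#'] := by decide
    rw [PySem.Str.toList_replace, hc, hh, replace_singleton]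

theorem alt_toList (s : String) :
    (maskDigits_alt s).toList
      = s.toList.map (fun c => if ("0123456789".toList).contains c then '#' else c) := by
  unfold maskDigits_alt
  rw [alt_chars, fold_map_chars]
  exact List.map_congr_left (fun c _ => point_digits c)

-- ===== VERDICT (by name: the statement is the Claim_ definition above) =====
theorem maskDigits_spec : Claim_equal_maskDigits := by
  intro s _
  unfold Spec_maskDigits
  apply String.ext
  rw [alt_toList]
  show (PySem.Str.join "" _).toList = _
  rw [join_empty_flatten, mask_foldl]
  simp
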